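-- pv_equiv track=rewrite | github.com/NovaPlusCoding/Infytq-Assignment-Solution | Programming-Fundamentals-Using-Python/Day9/Practice-Exercise/Level2/problem44.py | check_correct_depth
-- ===== SOURCE A (Python) =====
-- def check_correct_depth(input_list, depth=0):
--     count,flag = 0, True
--     for i in input_list:
--         if i == '(':
--             count += 1
--         elif i == ')':
--             count -= 1
--         else:
--             if int(i) != count:
--                 flag = False
--     return flag
-- ===== SOURCE B (Python) =====
-- from itertools import accumulate
--
-- def check_correct_depth(input_list, depth=0):
--     deltas = [1 if e == '(' else (-1 if e == ')' else 0) for e in input_list]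
--     depths = list(accumulate(deltas, initial=0))[1:]
--     # build the full list first: no short-circuit, so int() is applied to every
--     # non-paren label in order, as in the single-pass version
--     checks = [int(e) == d for e, d in zip(input_list, depths)
--               if e != '(' and e != ')']
--     return all(checks)
-- ===== Notes on version B (the rewrite author's own statement) =====
-- stated objective: alternative
-- what changed: Replaces the single stateful loop (mutable count and flag) with a two-phase pipeline: map elements to depth deltas and prefix-sum them into a depth table, then AND the comparisons int(label) == depth over the non-paren elements.
import Mathlib
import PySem

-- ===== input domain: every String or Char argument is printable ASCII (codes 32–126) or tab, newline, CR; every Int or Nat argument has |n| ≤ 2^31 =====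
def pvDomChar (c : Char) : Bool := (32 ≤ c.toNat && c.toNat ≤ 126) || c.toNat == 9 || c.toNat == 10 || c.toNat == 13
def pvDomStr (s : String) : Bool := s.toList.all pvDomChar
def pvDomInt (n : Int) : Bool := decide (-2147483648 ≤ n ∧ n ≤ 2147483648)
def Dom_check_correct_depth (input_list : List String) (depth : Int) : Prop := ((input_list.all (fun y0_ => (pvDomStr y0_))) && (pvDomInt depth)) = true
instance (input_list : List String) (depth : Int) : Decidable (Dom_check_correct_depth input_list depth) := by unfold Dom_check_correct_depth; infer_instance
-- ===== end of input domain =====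

-- ===== PORT A =====
-- B replaces A's single stateful loop with a delta-map + prefix-sum depth table and a fold of the comparisons (objective: alternative decomposition).
-- ===== PORT A =====
-- the loop body: state (count, flag); int(i) is PySem.Int.ofStr?; under Pre_ it is always some (the .getD 0 is never the raising case)
def pvStepA (st : Int × Bool) (i : String) : Int × Bool :=
  if i = "(" then (st.1 + 1, st.2)
  else if i = ")" then (st.1 - 1, st.2)
  else if ((PySem.Int.ofStr? i).getD 0 ≠ st.1) then (st.1, false) else st

def check_correct_depth (input_list : List String) (depth : Int) : Bool :=
  (input_list.foldl pvStepA (0, true)).2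

-- ===== PORT B =====
def pvDelta (e : String) : Int := if e = "(" then 1 else if e = ")" then -1 else 0

-- itertools.accumulate on the deltas, starting from acc (dropping the initial value)
def pvAccum : List Int → Int → List Int
  | [], _ => []
  | x :: xs, acc => (acc + x) :: pvAccum xs (acc + x)

def check_correct_depth_alt (input_list : List String) (depth : Int) : Bool :=
  let depths := pvAccum (input_list.map pvDelta) 0
  let checks := (input_list.zip depths).filterMap
    (fun p => if p.1 ≠ "(" ∧ p.1 ≠ ")" then
        some (decide ((PySem.Int.ofStr? p.1).getD 0 = p.2)) else none)
  checks.all id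

-- ===== PRECONDITION & SPEC =====
-- Pre_ excludes exactly the inputs where Python raises ValueError: a non-paren element that int() rejects
def Pre_check_correct_depth (input_list : List String) (depth : Int) : Prop :=
  ∀ e ∈ input_list, e ≠ "(" → e ≠ ")" → (PySem.Int.ofStr? e).isSome

instance (input_list : List String) (depth : Int) : Decidable (Pre_check_correct_depth input_list depth) := by unfold Pre_check_correct_depth; infer_instance

def pvWitness_check_correct_depth : List String × Int := (["(", "1", ")", "0"], 0)

def Spec_check_correct_depth (input_list : List String) (depth : Int) (out : Bool) : Prop := out = check_correct_depth_alt input_list depth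
instance (input_list : List String) (depth : Int) (out : Bool) : Decidable (Spec_check_correct_depth input_list depth out) := by unfold Spec_check_correct_depth; infer_instance

-- ===== CLAIM (what is proved, stated in full; the proofs are below) =====
def Claim_equal_check_correct_depth : Prop := ∀ (input_list : List String) (depth : Int), Dom_check_correct_depth input_list depth → Pre_check_correct_depth input_list depth → Spec_check_correct_depth input_list depth (check_correct_depth input_list depth)

-- ===== LEMMAS AND PROOFS =====
theorem pv_main (l : List String) : ∀ (c : Int) (flag : Bool),
    (l.foldl pvStepA (c, flag)).2 =
      (flag && ((l.zip (pvAccum (l.map pvDelta) c)).filterMap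
        (fun p => if p.1 ≠ "(" ∧ p.1 ≠ ")" then
            some (decide ((PySem.Int.ofStr? p.1).getD 0 = p.2)) else none)).all id) := by
  induction l with
  | nil => simp
  | cons x t ih =>
    intro c flag
    by_cases hx : x = "("
    · simp [hx, pvStepA, pvDelta, pvAccum, ih]
    · by_cases hy : x = ")"
      · simp [hx, hy, pvStepA, pvDelta, pvAccum, ih, sub_eq_add_neg]
      · simp only [List.foldl_cons, List.map_cons, pvDelta, if_neg hx, if_neg hy,
          pvAccum, List.zip_cons_cons, List.filterMap_cons]
        by_cases hv : (PySem.Int.ofStr? x).getD 0 = c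
        · simp [pvStepA, hx, hy, hv, ih]
        · simp [pvStepA, hx, hy, hv, ih]

-- ===== VERDICT (by name: the statement is the Claim_ definition above) =====
theorem check_correct_depth_spec : Claim_equal_check_correct_depth := by
  intro l d _ _
  unfold Spec_check_correct_depth check_correct_depth check_correct_depth_alt
  simpa using pv_main l 0 true
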